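-- pv_equiv track=rewrite | github.com/netra-systems/zen | fix_e2e_test_errors.py | fix_invalid_syntax_patterns
-- ===== SOURCE A (Python) =====
-- def fix_invalid_syntax_patterns(content: str) -> str:
--     """Fix common invalid syntax patterns."""
--     # Fix 'else:' without preceding if/elif
--     lines = content.split('\n')
--
--     for i, line in enumerate(lines):
--         if line.strip() == 'else:' and i > 0:
--             # Check if previous non-empty line is a valid if/elif
--             prev_line_idx = i - 1
--             while prev_line_idx >= 0 and not lines[prev_line_idx].strip():
--                 prev_line_idx -= 1
--
--             if prev_line_idx >= 0:
--                 prev_line = lines[prev_line_idx].strip()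
--                 if not (prev_line.startswith(('if ', 'elif ')) and prev_line.endswith(':')):
--                     # Insert a dummy if statement
--                     lines[i] = '        if True:  # Fixed invalid else\n            pass'
--
--     return '\n'.join(lines)
-- ===== SOURCE B (Python) =====
-- def fix_invalid_syntax_patterns(content: str) -> str:
--     """Fix common invalid syntax patterns (single forward pass)."""
--     out = []
--     prev = None  # stripped text of the most recent non-empty line emitted so far
--     for line in content.split('\n'):
--         s = line.strip()
--         if s == 'else:' and prev is not None and not (
--             prev.startswith(('if ', 'elif ')) and prev.endswith(':')
--         ):
--             line = '        if True:  # Fixed invalid else\n            pass'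
--             s = line.strip()
--         if s:
--             prev = s
--         out.append(line)
--     return '\n'.join(out)
-- ===== Notes on version B (the rewrite author's own statement) =====
-- stated objective: simpler
-- what changed: Replaced the index-based loop with an in-place mutated list and a nested backward while-scan for the previous non-empty line by a single forward pass that carries the stripped text of the last non-empty line in an accumulator, building the output list as it goes.
import Mathlib
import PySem

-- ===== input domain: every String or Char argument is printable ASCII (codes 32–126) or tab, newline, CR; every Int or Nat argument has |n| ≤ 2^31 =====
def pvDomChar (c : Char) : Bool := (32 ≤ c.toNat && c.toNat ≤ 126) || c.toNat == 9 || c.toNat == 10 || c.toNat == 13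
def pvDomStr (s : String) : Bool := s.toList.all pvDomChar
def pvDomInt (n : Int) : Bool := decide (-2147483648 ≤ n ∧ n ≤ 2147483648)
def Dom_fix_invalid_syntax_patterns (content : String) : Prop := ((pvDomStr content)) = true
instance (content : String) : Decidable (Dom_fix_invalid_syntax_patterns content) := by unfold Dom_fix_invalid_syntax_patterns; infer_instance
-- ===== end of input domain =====

-- B replaces A's in-place index loop with a nested backward scan for the previous
-- non-empty line by a single forward pass carrying the last non-empty stripped line (simpler).

-- ===== PORT A =====
def pvDummy : String := "        if True:  # Fixed invalid else\n            pass"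

def pvValidIf (p : String) : Bool :=
  (PySem.Str.startswith p "if " || PySem.Str.startswith p "elif ") && PySem.Str.endswith p ":"

-- the 'while prev_line_idx >= 0 and not lines[prev_line_idx].strip()' backward scan
def pvScanBack (ls : List String) : Nat → Option Nat
  | 0 => if PySem.Str.strip (ls.getD 0 "") == "" then none else some 0
  | (j+1) => if PySem.Str.strip (ls.getD (j+1) "") == "" then pvScanBack ls j else some (j+1)

def pvStepA (ls : List String) (i : Nat) : List String :=
  if PySem.Str.strip (ls.getD i "") == "else:" && decide (0 < i) then
    match pvScanBack ls (i - 1) with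
    | none => ls
    | some p =>
      let prev := PySem.Str.strip (ls.getD p "")
      if !(pvValidIf prev) then ls.set i pvDummy else ls
  else ls

def fix_invalid_syntax_patterns (content : String) : String :=
  let lines := (PySem.Str.split? content "\n").getD []
  PySem.Str.join "\n" ((List.range lines.length).foldl pvStepA lines)

-- ===== PORT B =====
def pvStepB (st : List String × Option String) (line : String) : List String × Option String :=
  let s := PySem.Str.strip line
  let ls : String × String :=
    if s == "else:" && (match st.2 with | some p => !(pvValidIf p) | none => false) then
      (pvDummy, PySem.Str.strip pvDummy)
    else (line, s)
  (st.1 ++ [ls.1], if ls.2 == "" then st.2 else some ls.2)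

def fix_invalid_syntax_patterns_alt (content : String) : String :=
  PySem.Str.join "\n" ((((PySem.Str.split? content "\n").getD []).foldl pvStepB ([], none)).1)

-- ===== PRECONDITION & SPEC =====
def Spec_fix_invalid_syntax_patterns (content : String) (out : String) : Prop := out = fix_invalid_syntax_patterns_alt content
instance (content : String) (out : String) : Decidable (Spec_fix_invalid_syntax_patterns content out) := by unfold Spec_fix_invalid_syntax_patterns; infer_instance

-- ===== CLAIM (what is proved, stated in full; the proofs are below) =====
def Claim_equal_fix_invalid_syntax_patterns : Prop := ∀ (content : String), Dom_fix_invalid_syntax_patterns content → Spec_fix_invalid_syntax_patterns content (fix_invalid_syntax_patterns content)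

-- ===== LEMMAS AND PROOFS =====

-- the stripped text of the last line with non-empty strip (B's 'prev' invariant value)
def pvLast (acc : List String) : Option String :=
  acc.foldl (fun prev line => if PySem.Str.strip line == "" then prev else some (PySem.Str.strip line)) none

-- the line B emits for input line l given the carried prev
def pvB (l : String) (prev : Option String) : String :=
  if (PySem.Str.strip l == "else:" && (match prev with | some p => !(pvValidIf p) | none => false)) = true
  then pvDummy else l

theorem pvLast_concat (acc : List String) (l : String) :
    pvLast (acc ++ [l]) = if PySem.Str.strip l == "" then pvLast acc else some (PySem.Str.strip l) := by
  simp [pvLast]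

theorem pv_getD_mid (acc rest : List String) (l : String) :
    (acc ++ l :: rest).getD acc.length "" = l := by
  simp [List.getD]

theorem pv_set_mid (acc rest : List String) (l x : String) :
    (acc ++ l :: rest).set acc.length x = acc ++ x :: rest := by
  induction acc with
  | nil => simp
  | cons a as ih => simp [ih]

theorem pvStepA_eq (ls : List String) (i : Nat)
    (h1 : PySem.Str.strip (ls.getD i "") = "else:") (h2 : 0 < i) :
    pvStepA ls i = match pvScanBack ls (i - 1) with
      | none => ls
      | some p => if pvValidIf (PySem.Str.strip (ls.getD p "")) = true then ls else ls.set i pvDummy := by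
  unfold pvStepA
  have hc : (PySem.Str.strip (ls.getD i "") == "else:" && decide (0 < i)) = true := by
    rw [h1]
    simp [h2]
  rw [hc, if_pos rfl]
  cases pvScanBack ls (i - 1) with
  | none => rfl
  | some p =>
    show (if (!pvValidIf (PySem.Str.strip (ls.getD p ""))) = true then ls.set i pvDummy else ls)
      = (if pvValidIf (PySem.Str.strip (ls.getD p "")) = true then ls else ls.set i pvDummy)
    rcases Bool.eq_false_or_eq_true (pvValidIf (PySem.Str.strip (ls.getD p ""))) with hv | hv
    · rw [hv]
      simp
    · rw [hv]
      simp

theorem pvStepA_skip (ls : List String) (i : Nat)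
    (h : ¬ ((PySem.Str.strip (ls.getD i "") == "else:") = true ∧ 0 < i)) :
    pvStepA ls i = ls := by
  unfold pvStepA
  have hc : (PySem.Str.strip (ls.getD i "") == "else:" && decide (0 < i)) = false := by
    rcases Decidable.not_and_iff_not_or_not.mp h with h | h
    · rw [Bool.eq_false_iff.mpr h]
      simp
    · have : i = 0 := by omega
      simp [this]
  rw [hc]
  simp

theorem pv_scan_eq_last (acc : List String) (h : acc ≠ []) (rest : List String) :
    Option.map (fun p => PySem.Str.strip ((acc ++ rest).getD p ""))
      (pvScanBack (acc ++ rest) (acc.length - 1)) = pvLast acc := by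
  induction acc using List.reverseRecOn generalizing rest with
  | nil => exact absurd rfl h
  | append_singleton as a ih =>
    rw [List.append_assoc]
    have hget : (as ++ ([a] ++ rest)).getD as.length "" = a := pv_getD_mid as rest a
    have hlen : (as ++ [a]).length - 1 = as.length := by simp
    rw [hlen]
    by_cases he : (PySem.Str.strip a == "") = true
    · rw [pvLast_concat, if_pos he]
      cases as with
      | nil => simp [pvScanBack, pvLast, he]
      | cons b bs =>
        show Option.map _ (pvScanBack ((b :: bs) ++ ([a] ++ rest)) (bs.length + 1)) = _
        rw [pvScanBack]
        have hg : ((b :: bs) ++ ([a] ++ rest)).getD (bs.length + 1) "" = a := by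
          simpa using pv_getD_mid (b :: bs) rest a
        rw [hg, if_pos he]
        exact ih (by simp) ([a] ++ rest)
    · -- last element non-empty: the scan stops immediately
      rw [pvLast_concat, if_neg he]
      cases as with
      | nil =>
        simp only [List.length_nil]
        rw [pvScanBack]
        simp [hget, he]
      | cons b bs =>
        show Option.map _ (pvScanBack ((b :: bs) ++ ([a] ++ rest)) (bs.length + 1)) = _
        rw [pvScanBack]
        have hg : ((b :: bs) ++ ([a] ++ rest)).getD (bs.length + 1) "" = a := by
          simpa using pv_getD_mid (b :: bs) rest a
        rw [hg, if_neg he]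
        simp [hg]

theorem pvB_none (l : String) : pvB l none = l := by
  simp [pvB]

theorem pvB_some (l p : String) :
    pvB l (some p) = if (PySem.Str.strip l == "else:" && !(pvValidIf p)) = true then pvDummy else l := rfl

theorem pvStepB_eq (acc : List String) (l : String) :
    pvStepB (acc, pvLast acc) l
      = (acc ++ [pvB l (pvLast acc)], pvLast (acc ++ [pvB l (pvLast acc)])) := by
  by_cases hc : (PySem.Str.strip l == "else:" &&
      (match pvLast acc with | some p => !(pvValidIf p) | none => false)) = true
  · simp only [pvStepB, pvB, hc, if_true]
    rw [pvLast_concat]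
  · have hc' := Bool.eq_false_iff.mpr hc
    simp only [pvStepB, pvB, hc', Bool.false_eq_true, if_false]
    rw [pvLast_concat]

theorem pv_main (rest : List String) : ∀ (acc : List String),
    (List.range' acc.length rest.length).foldl pvStepA (acc ++ rest)
      = (rest.foldl pvStepB (acc, pvLast acc)).1 := by
  induction rest with
  | nil => intro acc; simp
  | cons l rest ih =>
    intro acc
    rw [List.length_cons, List.range'_succ, List.foldl_cons, List.foldl_cons]
    have hget : (acc ++ l :: rest).getD acc.length "" = l := pv_getD_mid acc rest l
    rw [pvStepB_eq]
    have hA : pvStepA (acc ++ l :: rest) acc.length = acc ++ pvB l (pvLast acc) :: rest := by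
      by_cases hc : (PySem.Str.strip l == "else:") = true ∧ 0 < acc.length
      · obtain ⟨hs, hpos⟩ := hc
        have hne : acc ≠ [] := by
          intro hnil
          rw [hnil] at hpos
          exact absurd hpos (by simp)
        have hscan := pv_scan_eq_last acc hne (l :: rest)
        rw [pvStepA_eq _ _ (by rw [hget]; exact eq_of_beq hs) hpos]
        cases hsb : pvScanBack (acc ++ l :: rest) (acc.length - 1) with
        | none =>
          have hlast : pvLast acc = none := by rw [← hscan, hsb]; rfl
          have hB : pvB l (pvLast acc) = l := by rw [hlast, pvB_none]
          rw [hB]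
        | some p =>
          have hlast : pvLast acc = some (PySem.Str.strip ((acc ++ l :: rest).getD p "")) := by
            rw [← hscan, hsb]; rfl
          show (if pvValidIf (PySem.Str.strip ((acc ++ l :: rest).getD p "")) = true
              then acc ++ l :: rest else (acc ++ l :: rest).set acc.length pvDummy)
            = acc ++ pvB l (pvLast acc) :: rest
          rcases Bool.eq_false_or_eq_true
              (pvValidIf (PySem.Str.strip ((acc ++ l :: rest).getD p ""))) with hv | hv
          · rw [if_pos hv]
            have hB : pvB l (pvLast acc) = l := by
              rw [hlast, pvB_some, hs, hv]
              simp
            rw [hB]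
          · rw [if_neg (by rw [hv]; exact Bool.false_ne_true), pv_set_mid]
            have hB : pvB l (pvLast acc) = pvDummy := by
              rw [hlast, pvB_some, hs, hv]
              simp
            rw [hB]
      · rw [pvStepA_skip _ _ (by rw [hget]; exact hc)]
        have hB : pvB l (pvLast acc) = l := by
          rcases Decidable.not_and_iff_not_or_not.mp hc with h | h
          · simp [pvB, Bool.eq_false_iff.mpr h]
          · have hnil : acc = [] := by
              cases acc with
              | nil => rfl
              | cons x xs => exact absurd (by simp : 0 < (x :: xs).length) h
            simp [pvB, hnil, pvLast]
        rw [hB]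
    rw [hA]
    have := ih (acc ++ [pvB l (pvLast acc)])
    simpa using this

-- ===== VERDICT (by name: the statement is the Claim_ definition above) =====
theorem fix_invalid_syntax_patterns_spec : Claim_equal_fix_invalid_syntax_patterns := by
  intro content _
  unfold Spec_fix_invalid_syntax_patterns fix_invalid_syntax_patterns fix_invalid_syntax_patterns_alt
  have := pv_main ((PySem.Str.split? content "\n").getD []) []
  simp only [List.length_nil, List.nil_append, List.range_eq_range'] at this ⊢
  rw [this]
  rfl
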